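-- pv_equiv track=rewrite | github.com/randomtuser/python_1_year_HW | specops.py | koraki
-- ===== SOURCE A (Python) =====
-- def koraki(x, y, pot):
--     pot_korakov = [(x,y)]
--     for znak in pot:
--         if znak == "v":
--             y += 1
--             pot_korakov.append((x,y))
--         if znak == ">":
--             x += 1
--             pot_korakov.append((x, y))
--         if znak == "<":
--             x -= 1
--             pot_korakov.append((x, y))
--         if znak == "^":
--             y -= 1
--             pot_korakov.append((x, y))
--     return pot_korakov
-- ===== SOURCE B (Python) =====
-- def koraki(x, y, pot):
--     # structure-of-arrays: filter the moves, then compute the x- and y-coordinate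
--     # sequences as two independent running sums and zip them back into pairs
--     steps = [c for c in pot if c in "v><^"]
--     xs = [x]
--     for c in steps:
--         x = x + (c == '>') - (c == '<')
--         xs.append(x)
--     ys = [y]
--     for c in steps:
--         y = y + (c == 'v') - (c == '^')
--         ys.append(y)
--     return list(zip(xs, ys))
-- ===== Notes on version B (the rewrite author's own statement) =====
-- stated objective: alternative
-- what changed: Replaces A's single pass mutating an (x,y) pair inside a four-branch cascade with a structure-of-arrays decomposition: filter the move characters, compute the x-coordinate and y-coordinate sequences as two independent running sums using boolean arithmetic, and zip them into the list of positions.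
import Mathlib
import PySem

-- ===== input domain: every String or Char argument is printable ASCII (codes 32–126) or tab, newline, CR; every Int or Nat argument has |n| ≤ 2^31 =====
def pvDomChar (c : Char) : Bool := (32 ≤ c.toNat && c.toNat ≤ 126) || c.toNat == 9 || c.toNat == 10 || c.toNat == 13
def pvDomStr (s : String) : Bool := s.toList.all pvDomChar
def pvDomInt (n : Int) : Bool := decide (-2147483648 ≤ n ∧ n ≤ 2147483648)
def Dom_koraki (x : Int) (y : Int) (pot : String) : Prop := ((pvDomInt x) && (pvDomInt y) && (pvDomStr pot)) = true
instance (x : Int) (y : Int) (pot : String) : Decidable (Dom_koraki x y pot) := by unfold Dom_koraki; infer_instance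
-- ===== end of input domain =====

-- B recomputes the same path by a structure-of-arrays decomposition (filter moves, two
-- independent coordinate prefix-sum passes, zip) instead of A's single pass mutating a pair
-- inside a branch cascade (objective: alternative).

-- ===== PORT A =====
-- one iteration of A's loop body: four independent `if`s read and update the current state in sequence
def korakiStep (s : Int × Int × List (Int × Int)) (znak : Char) : Int × Int × List (Int × Int) :=
  let s := if znak = 'v' then (s.1, s.2.1 + 1, s.2.2 ++ [(s.1, s.2.1 + 1)]) else s
  let s := if znak = '>' then (s.1 + 1, s.2.1, s.2.2 ++ [(s.1 + 1, s.2.1)]) else s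
  let s := if znak = '<' then (s.1 - 1, s.2.1, s.2.2 ++ [(s.1 - 1, s.2.1)]) else s
  let s := if znak = '^' then (s.1, s.2.1 - 1, s.2.2 ++ [(s.1, s.2.1 - 1)]) else s
  s

def koraki (x : Int) (y : Int) (pot : String) : List (Int × Int) :=
  (pot.toList.foldl korakiStep (x, y, [(x, y)])).2.2

-- ===== PORT B =====
-- `c in "v><^"`
def korakiIsMove (c : Char) : Bool := "v><^".toList.contains c
-- `(c == '>') - (c == '<')` (Python booleans as 0/1 integers)
def korakiDx (c : Char) : Int := (if c = '>' then 1 else 0) - (if c = '<' then 1 else 0)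
-- `(c == 'v') - (c == '^')`
def korakiDy (c : Char) : Int := (if c = 'v' then 1 else 0) - (if c = '^' then 1 else 0)

def koraki_alt (x : Int) (y : Int) (pot : String) : List (Int × Int) :=
  let steps := pot.toList.filter korakiIsMove
  let xs := (steps.foldl (fun s c => let x := s.1 + korakiDx c; (x, s.2 ++ [x])) (x, [x])).2
  let ys := (steps.foldl (fun s c => let y := s.1 + korakiDy c; (y, s.2 ++ [y])) (y, [y])).2
  List.zip xs ys

-- ===== PRECONDITION & SPEC =====
def Spec_koraki (x : Int) (y : Int) (pot : String) (out : List (Int × Int)) : Prop := out = koraki_alt x y pot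
instance (x : Int) (y : Int) (pot : String) (out : List (Int × Int)) : Decidable (Spec_koraki x y pot out) := by unfold Spec_koraki; infer_instance

-- ===== CLAIM (what is proved, stated in full; the proofs are below) =====
def Claim_equal_koraki : Prop := ∀ (x : Int) (y : Int) (pot : String), Dom_koraki x y pot → Spec_koraki x y pot (koraki x y pot)

-- ===== LEMMAS AND PROOFS =====

-- the tail of the visited-position list (everything after the start point)
def korakiTail : List Char → Int → Int → List (Int × Int)
  | [], _, _ => []
  | c :: r, x, y =>
    if korakiIsMove c then
      (x + korakiDx c, y + korakiDy c) :: korakiTail r (x + korakiDx c) (y + korakiDy c)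
    else korakiTail r x y

-- the coordinate tails produced by B's two running-sum passes
def korakiTailX : List Char → Int → List Int
  | [], _ => []
  | c :: r, x => (x + korakiDx c) :: korakiTailX r (x + korakiDx c)

def korakiTailY : List Char → Int → List Int
  | [], _ => []
  | c :: r, y => (y + korakiDy c) :: korakiTailY r (y + korakiDy c)

-- A's fold characterised: it appends korakiTail to the accumulator
theorem korakiA_fold (cs : List Char) (x y : Int) (acc : List (Int × Int)) :
    (cs.foldl korakiStep (x, y, acc)).2.2 = acc ++ korakiTail cs x y := by
  induction cs generalizing x y acc with
  | nil => simp [korakiTail]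
  | cons c r ih =>
    by_cases hv : c = 'v'
    · subst hv; simp [korakiStep, korakiTail, korakiIsMove, korakiDx, korakiDy, ih]
    by_cases hr : c = '>'
    · subst hr; simp [korakiStep, korakiTail, korakiIsMove, korakiDx, korakiDy, ih]
    by_cases hl : c = '<'
    · subst hl; simp [korakiStep, korakiTail, korakiIsMove, korakiDx, korakiDy, ih, sub_eq_add_neg]
    by_cases hu : c = '^'
    · subst hu; simp [korakiStep, korakiTail, korakiIsMove, korakiDx, korakiDy, ih, sub_eq_add_neg]
    have hm : korakiIsMove c = false := by
      simp [korakiIsMove, hv, hr, hl, hu]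
    simp [korakiStep, korakiTail, hv, hr, hl, hu, hm, ih]

-- B's x-pass characterised
theorem korakiB_foldx (ws : List Char) (x : Int) (l : List Int) :
    (ws.foldl (fun s c => let x := s.1 + korakiDx c; (x, s.2 ++ [x])) (x, l)).2
      = l ++ korakiTailX ws x := by
  induction ws generalizing x l with
  | nil => simp [korakiTailX]
  | cons c r ih => simp [korakiTailX, ih]

-- B's y-pass characterised
theorem korakiB_foldy (ws : List Char) (y : Int) (l : List Int) :
    (ws.foldl (fun s c => let y := s.1 + korakiDy c; (y, s.2 ++ [y])) (y, l)).2
      = l ++ korakiTailY ws y := by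
  induction ws generalizing y l with
  | nil => simp [korakiTailY]
  | cons c r ih => simp [korakiTailY, ih]

-- skipping non-moves changes nothing in the visited tail
theorem korakiTail_filter (cs : List Char) (x y : Int) :
    korakiTail (cs.filter korakiIsMove) x y = korakiTail cs x y := by
  induction cs generalizing x y with
  | nil => rfl
  | cons c r ih =>
    by_cases hm : korakiIsMove c
    · simp [List.filter, hm, korakiTail, ih]
    · simp only [Bool.not_eq_true] at hm
      simp [List.filter, hm, korakiTail, ih]

-- on an all-moves list, zipping the two coordinate tails rebuilds the pair tail
theorem korakiTail_zip (ws : List Char) (x y : Int)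
    (h : ∀ c ∈ ws, korakiIsMove c = true) :
    List.zip (korakiTailX ws x) (korakiTailY ws y) = korakiTail ws x y := by
  induction ws generalizing x y with
  | nil => rfl
  | cons c r ih =>
    have hc := h c (List.mem_cons_self ..)
    simp only [korakiTailX, korakiTailY, korakiTail, hc, if_true, List.zip_cons_cons]
    rw [ih _ _ (fun d hd => h d (List.mem_cons_of_mem _ hd))]

-- ===== VERDICT (by name: the statement is the Claim_ definition above) =====
theorem koraki_spec : Claim_equal_koraki := by
  intro x y pot _
  unfold Spec_koraki koraki koraki_alt
  simp only [korakiA_fold, korakiB_foldx, korakiB_foldy, List.singleton_append,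
    List.zip_cons_cons]
  have hall : ∀ c ∈ pot.toList.filter korakiIsMove, korakiIsMove c = true := by
    intro c hc; exact (List.mem_filter.mp hc).2
  rw [korakiTail_zip _ _ _ hall, korakiTail_filter]
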